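-- pv_equiv track=rewrite | github.com/nateshv54/DSA | Strings/String Set 3/Match Specific Pattern.py | matchSpecificPattern
-- ===== SOURCE A (Python) =====
-- def generateHash(str):
--
--     # Maintain a HashMap
--     mp = {}
--
--     # Create a varible hash, which will store the hash for a given word
--     hash = ''
--
--     counter = 1
--
--     for i in range(len(str)):
--
--         ch = str[i]
--
--         if (ch not in mp.keys()):
--
--             # Found a distinct character
--             mp[ch] = counter
--             counter += 1
--
--         converted_num = '% s' % mp[ch]
--         hash = hash + converted_num
--
--     # Return the variable hash
--     return hash
--
-- def matchSpecificPattern(words, n, pattern):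
--
--     # Create an array to store all valid words
--     ans = []
--
--     hashPattern = generateHash(pattern)
--
--     # Iterate over all the words
--     for i in range(n):
--
--         word = words[i]
--
--         if (len(word) == len(pattern)):
--
--             hashWord = generateHash(word)
--
--             if (hashWord == hashPattern):
--
--                 # Word matches the pattern
--                 ans.append(word)
--
--     # Return the array answer
--     return ans
-- ===== SOURCE B (Python) =====
-- def matchSpecificPattern(words, n, pattern):
--     # Direct two-map bijection check per candidate; no hash normalization.
--     ans = []
--     for i in range(n):
--         word = words[i]
--         if len(word) != len(pattern):
--             continue
--         p2w = {}
--         w2p = {}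
--         ok = True
--         for pc, wc in zip(pattern, word):
--             if pc in p2w:
--                 if p2w[pc] != wc:
--                     ok = False
--                     break
--             else:
--                 p2w[pc] = wc
--             if wc in w2p:
--                 if w2p[wc] != pc:
--                     ok = False
--                     break
--             else:
--                 w2p[wc] = pc
--         if ok:
--             ans.append(word)
--     return ans
-- ===== Notes on version B (the rewrite author's own statement) =====
-- stated objective: simpler
-- what changed: B drops generateHash entirely and tests each same-length candidate by a single parallel scan of zip(pattern, word) maintaining two char-to-char maps (a bijection check) with early exit on the first conflict, instead of normalizing both strings to decimal label strings and comparing those strings.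
-- intended difference: On inputs where some of the first n words has the pattern's length and is NOT isomorphic to it, yet the unseparated decimal concatenations of the two canonical label sequences coincide (possible once 10+ distinct characters appear, e.g. labels 1..10,1,11 vs 1..10,11,1), A wrongly includes that word because its ambiguous hash strings compare equal, while B excludes it; B's value is the intended 'words matching the pattern'. — e.g. on matchSpecificPattern(["abcdefghijka"], 1, "abcdefghijak"): A returns ["abcdefghijka"], B returns []
import Mathlib
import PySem

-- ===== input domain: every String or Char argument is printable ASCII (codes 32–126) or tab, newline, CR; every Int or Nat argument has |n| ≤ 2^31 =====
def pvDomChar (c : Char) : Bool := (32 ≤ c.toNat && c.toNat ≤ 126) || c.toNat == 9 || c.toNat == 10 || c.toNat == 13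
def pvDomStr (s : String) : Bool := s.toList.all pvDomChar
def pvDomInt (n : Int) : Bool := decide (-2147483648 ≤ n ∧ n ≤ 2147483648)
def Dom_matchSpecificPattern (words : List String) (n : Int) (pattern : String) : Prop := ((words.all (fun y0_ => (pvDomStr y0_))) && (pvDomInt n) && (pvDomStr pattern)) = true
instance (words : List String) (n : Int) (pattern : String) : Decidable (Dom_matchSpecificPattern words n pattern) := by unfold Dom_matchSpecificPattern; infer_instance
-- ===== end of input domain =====

-- B replaces A's 'normalize both strings to decimal label strings and compare' with a direct
-- two-map bijection scan per candidate (objective: simpler); B differs intentionally on the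
-- hash-collision corner stated at D_ below.

-- ===== PORT A =====
-- Strings are handled as List Char (PySem convention; 'for i in range(len(str)): ch = str[i]'
-- reads the characters in order, ported as a fold over the char list); the hash accumulates as
-- a char list and '% s' % k renders as str(k) = PySem.Int.toChars k (no space, checked in CPython).
def generateHash (s : String) : List Char :=
  let r := s.toList.foldl
    (fun (st : PySem.Dict Char Int × List Char × Int) ch =>
      let st1 := if st.1.contains ch then st else (st.1.insert ch st.2.2, st.2.1, st.2.2 + 1)
      (st1.1, st1.2.1 ++ PySem.Int.toChars (st1.1.getD ch 0), st1.2.2))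
    (PySem.Dict.empty, ([] : List Char), (1 : Int))
  r.2.1

def matchSpecificPattern (words : List String) (n : Int) (pattern : String) : List String :=
  let hashPattern := generateHash pattern
  (PySem.List.pyRange 0 n 1).foldl
    (fun ans i =>
      let word := PySem.List.pyGetD words i ""
      if PySem.Str.len word = PySem.Str.len pattern then
        let hashWord := generateHash word
        if hashWord = hashPattern then ans ++ [word] else ans
      else ans)
    []

-- ===== PORT B =====
def isoScan : List (Char × Char) → PySem.Dict Char Char → PySem.Dict Char Char → Bool
  | [], _, _ => true
  | (pc, wc) :: rest, p2w, w2p =>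
    match p2w.get? pc with
    | some x =>
      if x ≠ wc then false
      else match w2p.get? wc with
        | some y => if y ≠ pc then false else isoScan rest p2w w2p
        | none => isoScan rest p2w (w2p.insert wc pc)
    | none =>
      let p2w' := p2w.insert pc wc
      match w2p.get? wc with
      | some y => if y ≠ pc then false else isoScan rest p2w' w2p
      | none => isoScan rest p2w' (w2p.insert wc pc)

def matchSpecificPattern_alt (words : List String) (n : Int) (pattern : String) : List String :=
  (PySem.List.pyRange 0 n 1).foldl
    (fun ans i =>
      let word := PySem.List.pyGetD words i ""
      if PySem.Str.len word ≠ PySem.Str.len pattern then ans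
      else if isoScan (pattern.toList.zip word.toList) PySem.Dict.empty PySem.Dict.empty
           then ans ++ [word] else ans)
    []

-- ===== PRECONDITION & SPEC =====
-- Pre_ excludes exactly the inputs where A raises IndexError: n beyond len(words).
def Pre_matchSpecificPattern (words : List String) (n : Int) (_pattern : String) : Prop :=
  n ≤ (words.length : Int)
instance (words : List String) (n : Int) (pattern : String) : Decidable (Pre_matchSpecificPattern words n pattern) := by unfold Pre_matchSpecificPattern; infer_instance
def pvWitness_matchSpecificPattern : List String × Int × String := (["ab"], 1, "cd")

-- canonical first-occurrence label sequence of a string (spec-side notion, used only by D_)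
def labsFrom (seen : List Char) : List Char → List Int
  | [] => []
  | c :: cs =>
    let seen' := PySem.Set.add seen c
    (((seen'.idxOf c : Nat) : Int) + 1) :: labsFrom seen' cs

-- the unseparated decimal rendering of that label sequence (what A's hash amounts to)
def canonHash (cs : List Char) : List Char := (labsFrom [] cs).flatMap PySem.Int.toChars

-- On inputs where some of the first n words has the pattern's length and is NOT isomorphic to it
-- yet the unseparated decimal concatenations of the two canonical label sequences coincide
-- (possible once 10+ distinct characters appear), A wrongly includes that word because its
-- ambiguous hash strings compare equal, while B excludes it; B returns the intended matches.
def D_matchSpecificPattern (words : List String) (n : Int) (pattern : String) : Prop :=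
  ∃ w ∈ words.take n.toNat,
    w.toList.length = pattern.toList.length ∧
    labsFrom [] w.toList ≠ labsFrom [] pattern.toList ∧
    canonHash w.toList = canonHash pattern.toList
instance (words : List String) (n : Int) (pattern : String) : Decidable (D_matchSpecificPattern words n pattern) := by unfold D_matchSpecificPattern; infer_instance

def Spec_matchSpecificPattern (words : List String) (n : Int) (pattern : String) (out : List String) : Prop := ¬ D_matchSpecificPattern words n pattern → out = matchSpecificPattern_alt words n pattern
instance (words : List String) (n : Int) (pattern : String) (out : List String) : Decidable (Spec_matchSpecificPattern words n pattern out) := by unfold Spec_matchSpecificPattern; infer_instance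

def pvDiffWitness_matchSpecificPattern : List String × Int × String := (["abcdefghijka"], 1, "abcdefghijak")
def pvDiffWitnessOut_matchSpecificPattern : (List String) × (List String) := (["abcdefghijka"], [])

-- ===== CLAIM (what is proved, stated in full; the proofs are below) =====
def Claim_unchanged_matchSpecificPattern : Prop := ∀ (words : List String) (n : Int) (pattern : String), Dom_matchSpecificPattern words n pattern → Pre_matchSpecificPattern words n pattern → Spec_matchSpecificPattern words n pattern (matchSpecificPattern words n pattern)
def Claim_changed_matchSpecificPattern : Prop := Dom_matchSpecificPattern (pvDiffWitness_matchSpecificPattern.1) (pvDiffWitness_matchSpecificPattern.2.1) (pvDiffWitness_matchSpecificPattern.2.2) ∧ Pre_matchSpecificPattern (pvDiffWitness_matchSpecificPattern.1) (pvDiffWitness_matchSpecificPattern.2.1) (pvDiffWitness_matchSpecificPattern.2.2) ∧ D_matchSpecificPattern (pvDiffWitness_matchSpecificPattern.1) (pvDiffWitness_matchSpecificPattern.2.1) (pvDiffWitness_matchSpecificPattern.2.2) ∧ matchSpecificPattern (pvDiffWitness_matchSpecificPattern.1) (pvDiffWitness_matchSpecificPattern.2.1) (pvDiffWitness_matchSpecificPattern.2.2)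 = pvDiffWitnessOut_matchSpecificPattern.1 ∧ matchSpecificPattern_alt (pvDiffWitness_matchSpecificPattern.1) (pvDiffWitness_matchSpecificPattern.2.1) (pvDiffWitness_matchSpecificPattern.2.2) = pvDiffWitnessOut_matchSpecificPattern.2 ∧ pvDiffWitnessOut_matchSpecificPattern.1 ≠ pvDiffWitnessOut_matchSpecificPattern.2
def Claim_exact_matchSpecificPattern : Prop := ∀ (words : List String) (n : Int) (pattern : String), Dom_matchSpecificPattern words n pattern → Pre_matchSpecificPattern words n pattern → D_matchSpecificPattern words n pattern → matchSpecificPattern words n pattern ≠ matchSpecificPattern_alt words n pattern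

-- ===== LEMMAS AND PROOFS =====

lemma idxOf_append_self_char (l : List Char) (c : Char) (h : c ∉ l) :
    (l ++ [c]).idxOf c = l.length := by
  induction l with
  | nil => simp
  | cons x xs ih =>
    have hx : x ≠ c := by rintro rfl; exact h (List.mem_cons_self ..)
    simp [hx, ih (by intro hm; exact h (List.mem_cons_of_mem _ hm))]

lemma genA_loop (cs : List Char) (seen : List Char) (mp : PySem.Dict Char Int) (acc : List Char)
    (hnd : seen.Nodup)
    (hc : ∀ c, mp.contains c = decide (c ∈ seen))
    (hg : ∀ c ∈ seen, mp.getD c 0 = ((seen.idxOf c : Nat) : Int) + 1) :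
    (cs.foldl (fun (st : PySem.Dict Char Int × List Char × Int) ch =>
        let st1 := if st.1.contains ch then st else (st.1.insert ch st.2.2, st.2.1, st.2.2 + 1)
        (st1.1, st1.2.1 ++ PySem.Int.toChars (st1.1.getD ch 0), st1.2.2))
      (mp, acc, (seen.length : Int) + 1)).2.1
    = acc ++ (labsFrom seen cs).flatMap PySem.Int.toChars := by
  induction cs generalizing seen mp acc with
  | nil => simp [labsFrom]
  | cons c cs ih =>
    simp only [List.foldl_cons]
    by_cases hmem : c ∈ seen
    · have hcont : mp.contains c = true := by rw [hc]; simp [hmem]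
      have hadd : PySem.Set.add seen c = seen := by simp [PySem.Set.add, hmem]
      have hval : mp.getD c 0 = ((seen.idxOf c : Nat) : Int) + 1 := hg c hmem
      simp only [hcont, if_true]
      rw [ih seen mp _ hnd hc hg]
      simp [labsFrom, hadd, hval]
    · have hcont : mp.contains c = false := by rw [hc]; simp [hmem]
      have hadd : PySem.Set.add seen c = seen ++ [c] := by simp [PySem.Set.add, hmem]
      have hnd' : (seen ++ [c]).Nodup := by
        simp [List.nodup_append, hnd]
        intro a ha h
        exact hmem (h ▸ ha)
      have hc' : ∀ d, (mp.insert c ((seen.length : Int) + 1)).contains d = decide (d ∈ seen ++ [c]) := by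
        intro d
        rw [PySem.Dict.contains_insert]
        by_cases hd : d = c
        · simp [hd]
        · simp [hd, hc d]
      have hg' : ∀ d ∈ seen ++ [c], (mp.insert c ((seen.length : Int) + 1)).getD d 0
          = (((seen ++ [c]).idxOf d : Nat) : Int) + 1 := by
        intro d hdm
        by_cases hd : d = c
        · subst hd
          rw [PySem.Dict.getD_insert_self, idxOf_append_self_char seen d hmem]
        · have hdseen : d ∈ seen := by
            rcases List.mem_append.mp hdm with h | h
            · exact h
            · simp at h; exact absurd h hd
          rw [PySem.Dict.getD_insert_of_ne _ _ _ hd, hg d hdseen,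
              List.idxOf_append_of_mem hdseen]
      have hlen' : ((seen.length : Int) + 1) + 1 = (((seen ++ [c]).length : Nat) : Int) + 1 := by
        simp only [List.length_append, List.length_cons, List.length_nil]
        push_cast
        ring
      simp only [hcont, Bool.false_eq_true, if_false]
      have := ih (seen ++ [c]) (mp.insert c ((seen.length : Int) + 1))
        (acc ++ PySem.Int.toChars ((mp.insert c ((seen.length : Int) + 1)).getD c 0)) hnd' hc' hg'
      rw [hlen']
      rw [this]
      simp [labsFrom, hadd, PySem.Dict.getD_insert_self,
        idxOf_append_self_char seen c hmem]

lemma genHash_eq (s : String) : generateHash s = canonHash s.toList := by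
  unfold generateHash canonHash
  have h := genA_loop s.toList [] PySem.Dict.empty [] (by simp) (by simp) (by simp)
  simpa using h

lemma scan_loop (ps : List Char) : ∀ (ws sp sw : List Char) (f g : PySem.Dict Char Char)
    (_ : ps.length = ws.length)
    (_ : sp.Nodup) (_ : sw.Nodup) (hsl : sp.length = sw.length)
    (_ : ∀ a, a ∉ sp → f.get? a = none)
    (_ : ∀ (i : Nat) (h : i < sp.length), f.get? sp[i] = some (sw[i]'(by omega)))
    (_ : ∀ b, b ∉ sw → g.get? b = none)
    (_ : ∀ (i : Nat) (h : i < sw.length), g.get? sw[i] = some (sp[i]'(by omega))),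
    ((isoScan (ps.zip ws) f g = true) ↔ labsFrom sp ps = labsFrom sw ws) := by
  induction ps with
  | nil =>
    intro ws sp sw f g hlen hndp hndw hsl hf0 hf1 hg0 hg1
    cases ws with
    | nil => simp [isoScan, labsFrom]
    | cons w ws => simp at hlen
  | cons p ps ih =>
    intro ws sp sw f g hlen hndp hndw hsl hf0 hf1 hg0 hg1
    cases ws with
    | nil => simp at hlen
    | cons w ws =>
    have hlen' : ps.length = ws.length := by simpa using hlen
    simp only [List.zip_cons_cons, isoScan]
    by_cases hp : p ∈ sp
    · have hi : sp.idxOf p < sp.length := List.idxOf_lt_length_of_mem hp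
      have hi' : sp.idxOf p < sw.length := by omega
      have hspi : sp[sp.idxOf p] = p := List.getElem_idxOf hi
      have hf : f.get? p = some (sw[sp.idxOf p]'hi') := by
        have h := hf1 (sp.idxOf p) hi
        rwa [hspi] at h
      have haddp : PySem.Set.add sp p = sp := by simp [PySem.Set.add, hp]
      by_cases hw : sw[sp.idxOf p]'hi' = w
      · have hwmem : w ∈ sw := hw ▸ List.getElem_mem hi'
        have hswj : sw.idxOf w < sw.length := List.idxOf_lt_length_of_mem hwmem
        have hj : sw.idxOf w = sp.idxOf p := by
          apply (List.Nodup.getElem_inj_iff hndw).mp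
          rw [List.getElem_idxOf hswj, hw]
        have hgw : g.get? w = some p := by
          have h := hg1 (sp.idxOf p) hi'
          rw [hw] at h
          rw [h]
          exact congrArg some hspi
        have haddw : PySem.Set.add sw w = sw := by simp [PySem.Set.add, hwmem]
        rw [hf, hgw]
        simp only [hw, ne_eq, not_true_eq_false, if_false]
        rw [ih ws sp sw f g hlen' hndp hndw hsl hf0 hf1 hg0 hg1]
        simp [labsFrom, haddp, haddw, hj]
      · -- mismatch: scan rejects, and the label heads differ
        rw [hf]
        simp only [hw, ne_eq, not_false_eq_true, if_true]
        constructor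
        · intro h; exact absurd h (by simp)
        · intro h
          exfalso
          simp only [labsFrom, haddp, List.cons.injEq] at h
          by_cases hwm : w ∈ sw
          · have hswj : sw.idxOf w < sw.length := List.idxOf_lt_length_of_mem hwm
            have haddw : PySem.Set.add sw w = sw := by simp [PySem.Set.add, hwm]
            rw [haddw] at h
            have hji : sw.idxOf w = sp.idxOf p := by
              have := h.1
              omega
            have hgetw : sw[sw.idxOf w] = w := List.getElem_idxOf hswj
            simp only [hji] at hgetw
            exact hw hgetw
          · have haddw : PySem.Set.add sw w = sw ++ [w] := by simp [PySem.Set.add, hwm]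
            rw [haddw, idxOf_append_self_char sw w hwm] at h
            have := h.1
            omega
    · have hf : f.get? p = none := hf0 p hp
      have haddp : PySem.Set.add sp p = sp ++ [p] := by simp [PySem.Set.add, hp]
      rw [hf]
      by_cases hwm : w ∈ sw
      · have hswj : sw.idxOf w < sw.length := List.idxOf_lt_length_of_mem hwm
        have hswj' : sw.idxOf w < sp.length := by omega
        have hgw : g.get? w = some (sp[sw.idxOf w]'hswj') := by
          have h := hg1 (sw.idxOf w) hswj
          rwa [List.getElem_idxOf hswj] at h
        have hne : sp[sw.idxOf w]'hswj' ≠ p := by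
          intro hEq
          exact hp (hEq ▸ List.getElem_mem hswj')
        have haddw : PySem.Set.add sw w = sw := by simp [PySem.Set.add, hwm]
        rw [hgw]
        simp only [hne, ne_eq, not_false_eq_true, if_true]
        constructor
        · intro h; exact absurd h (by simp)
        · intro h
          exfalso
          simp only [labsFrom, haddp, haddw, List.cons.injEq,
            idxOf_append_self_char sp p hp] at h
          have := h.1
          omega
      · have hgw : g.get? w = none := hg0 w hwm
        have haddw : PySem.Set.add sw w = sw ++ [w] := by simp [PySem.Set.add, hwm]
        rw [hgw]
        have hndp' : (sp ++ [p]).Nodup := by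
          simp [List.nodup_append, hndp]
          intro a ha hEq
          exact hp (hEq ▸ ha)
        have hndw' : (sw ++ [w]).Nodup := by
          simp [List.nodup_append, hndw]
          intro a ha hEq
          exact hwm (hEq ▸ ha)
        have hsl' : (sp ++ [p]).length = (sw ++ [w]).length := by simp [hsl]
        have hf0' : ∀ a, a ∉ sp ++ [p] → (f.insert p w).get? a = none := by
          intro a ha
          have hap : a ≠ p := by intro hEq; exact ha (by simp [hEq])
          rw [PySem.Dict.get?_insert_of_ne _ _ hap]
          exact hf0 a (fun hm => ha (by simp [hm]))
        have hg0' : ∀ b, b ∉ sw ++ [w] → (g.insert w p).get? b = none := by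
          intro b hb
          have hbw : b ≠ w := by intro hEq; exact hb (by simp [hEq])
          rw [PySem.Dict.get?_insert_of_ne _ _ hbw]
          exact hg0 b (fun hm => hb (by simp [hm]))
        have hf1' : ∀ (i : Nat) (h : i < (sp ++ [p]).length),
            (f.insert p w).get? (sp ++ [p])[i] = some ((sw ++ [w])[i]'(by omega)) := by
          intro i h
          simp only [List.length_append, List.length_cons, List.length_nil] at h
          by_cases hil : i < sp.length
          · rw [List.getElem_append_left hil]
            have hnep : sp[i] ≠ p := by
              intro hEq
              exact hp (hEq ▸ List.getElem_mem hil)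
            rw [PySem.Dict.get?_insert_of_ne _ _ hnep, hf1 i hil]
            congr 1
            rw [List.getElem_append_left (by omega)]
          · have hieq : i = sp.length := by omega
            subst hieq
            have h1 : (sp ++ [p])[sp.length]'(by simp) = p := by simp
            have h2 : (sw ++ [w])[sp.length]'(by simp [← hsl]) = w := by
              have : sp.length = sw.length := hsl
              simp [this]
            rw [h1, PySem.Dict.get?_insert_self]
            exact congrArg some h2.symm
        have hg1' : ∀ (i : Nat) (h : i < (sw ++ [w]).length),
            (g.insert w p).get? (sw ++ [w])[i] = some ((sp ++ [p])[i]'(by omega)) := by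
          intro i h
          simp only [List.length_append, List.length_cons, List.length_nil] at h
          by_cases hil : i < sw.length
          · rw [List.getElem_append_left hil]
            have hnew : sw[i] ≠ w := by
              intro hEq
              exact hwm (hEq ▸ List.getElem_mem hil)
            rw [PySem.Dict.get?_insert_of_ne _ _ hnew, hg1 i hil]
            congr 1
            rw [List.getElem_append_left (by omega)]
          · have hieq : i = sw.length := by omega
            subst hieq
            have h1 : (sw ++ [w])[sw.length]'(by simp) = w := by simp
            have h2 : (sp ++ [p])[sw.length]'(by simp [hsl]) = p := by
              have : sw.length = sp.length := hsl.symm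
              simp [this]
            rw [h1, PySem.Dict.get?_insert_self]
            exact congrArg some h2.symm
        rw [ih ws (sp ++ [p]) (sw ++ [w]) (f.insert p w) (g.insert w p)
          hlen' hndp' hndw' hsl' hf0' hf1' hg0' hg1']
        simp only [labsFrom, haddp, haddw, List.cons.injEq,
          idxOf_append_self_char sp p hp, idxOf_append_self_char sw w hwm]
        constructor
        · intro h; exact ⟨by omega, h⟩
        · intro h; exact h.2

lemma altAccept (p w : String) (hl : p.toList.length = w.toList.length) :
    (isoScan (p.toList.zip w.toList) PySem.Dict.empty PySem.Dict.empty = true)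
      ↔ labsFrom [] p.toList = labsFrom [] w.toList := by
  refine scan_loop p.toList w.toList [] [] _ _ hl (by simp) (by simp) (by simp) ?_ ?_ ?_ ?_ <;>
    simp [PySem.Dict.get?_empty]

lemma countP_lt_aux {α : Type} (p q : α → Bool) (l : List α)
    (hpq : ∀ x ∈ l, q x = true → p x = true)
    (x0 : α) (hx0 : x0 ∈ l) (hp0 : p x0 = true) (hq0 : q x0 = false) :
    l.countP q < l.countP p := by
  induction l with
  | nil => simp at hx0
  | cons y ys ih =>
    rcases List.mem_cons.mp hx0 with h | h
    · subst h
      simp only [List.countP_cons, hp0, hq0]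
      have : ys.countP q ≤ ys.countP p :=
        List.countP_mono_left (fun x hx => hpq x (List.mem_cons_of_mem _ hx))
      simp; omega
    · have h1 := ih (fun x hx => hpq x (List.mem_cons_of_mem _ hx)) h
      simp only [List.countP_cons]
      by_cases hq : q y = true
      · rw [if_pos hq, if_pos (hpq y (List.mem_cons_self ..) hq)]; omega
      · simp only [Bool.not_eq_true] at hq
        have hq0' : (if q y = true then (1:Nat) else 0) = 0 := by simp [hq]
        rw [hq0']
        split <;> omega

-- ===== VERDICT (by name: the statement is the Claim_ definition above) =====
lemma hashIff (word pattern : String) (hll : word.toList.length = pattern.toList.length) :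
    ((generateHash word = generateHash pattern)
      ↔ (isoScan (pattern.toList.zip word.toList) PySem.Dict.empty PySem.Dict.empty = true))
      ∨ (labsFrom [] word.toList ≠ labsFrom [] pattern.toList
          ∧ canonHash word.toList = canonHash pattern.toList) := by
  by_cases hlab : labsFrom [] pattern.toList = labsFrom [] word.toList
  · left
    constructor
    · intro _; exact (altAccept pattern word hll.symm).mpr hlab
    · intro _
      rw [genHash_eq, genHash_eq]
      unfold canonHash
      rw [hlab]
  · by_cases hhash : generateHash word = generateHash pattern
    · right
      refine ⟨fun h => hlab h.symm, ?_⟩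
      rw [genHash_eq, genHash_eq] at hhash
      exact hhash
    · left
      constructor
      · intro h; exact absurd h hhash
      · intro h
        exact absurd ((altAccept pattern word hll.symm).mp h) hlab

lemma strLen_iff (a b : String) : PySem.Str.len a = PySem.Str.len b ↔ a.toList.length = b.toList.length := by
  have ha : PySem.Str.len a = (a.toList.length : Int) := by simp [PySem.Str.len_eq]
  have hb : PySem.Str.len b = (b.toList.length : Int) := by simp [PySem.Str.len_eq]
  rw [ha, hb]
  omega

lemma word_mem_take (words : List String) (n i : Int) (h0 : 0 ≤ i) (hin : i < n)
    (hil : i.toNat < words.length) :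
    PySem.List.pyGetD words i "" ∈ words.take n.toNat := by
  rw [PySem.List.pyGetD_eq_getElem words "" h0 (by omega)]
  have hlt : i.toNat < (words.take n.toNat).length := by
    simp [List.length_take]
    omega
  have : (words.take n.toNat)[i.toNat]'hlt = words[i.toNat] := List.getElem_take
  exact this ▸ List.getElem_mem hlt

theorem matchSpecificPattern_spec : Claim_unchanged_matchSpecificPattern := by
  intro words n pattern hdom hpre hnd
  show matchSpecificPattern words n pattern = matchSpecificPattern_alt words n pattern
  unfold matchSpecificPattern matchSpecificPattern_alt
  simp only []
  apply PySem.List.foldl_congr_mem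
  intro acc i hi
  obtain ⟨h0i, hin⟩ := PySem.List.mem_pyRange_one.mp hi
  have hil : i.toNat < words.length := by
    have hpre' : n ≤ (words.length : Int) := hpre
    omega
  by_cases hl : PySem.Str.len (PySem.List.pyGetD words i "") = PySem.Str.len pattern
  · have hll : (PySem.List.pyGetD words i "").toList.length = pattern.toList.length :=
      (strLen_iff _ _).mp hl
    rcases hashIff (PySem.List.pyGetD words i "") pattern hll with hiff | hbad
    · simp only [hl, if_true, ne_eq, not_true_eq_false, if_false]
      by_cases hh : generateHash (PySem.List.pyGetD words i "") = generateHash pattern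
      · rw [if_pos hh, if_pos (hiff.mp hh)]
      · rw [if_neg hh, if_neg (fun hsc => hh (hiff.mpr hsc))]
    · exact absurd ⟨PySem.List.pyGetD words i "", word_mem_take words n i h0i hin hil,
        hll, hbad.1, hbad.2⟩ hnd
  · simp only [hl, if_false, ne_eq, not_false_eq_true, if_true]

theorem matchSpecificPattern_changed : Claim_changed_matchSpecificPattern := by
  unfold Claim_changed_matchSpecificPattern; decide

theorem matchSpecificPattern_tight : Claim_exact_matchSpecificPattern := by
  intro words n pattern hdom hpre hD
  have hA : matchSpecificPattern words n pattern
      = ((PySem.List.pyRange 0 n 1).filter (fun i =>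
          decide (PySem.Str.len (PySem.List.pyGetD words i "") = PySem.Str.len pattern ∧
            generateHash (PySem.List.pyGetD words i "") = generateHash pattern))).map
          (fun i => PySem.List.pyGetD words i "") := by
    unfold matchSpecificPattern
    simp only []
    rw [PySem.List.foldl_congr_mem (PySem.List.pyRange 0 n 1)
      (fun (ans : List String) i =>
        if PySem.Str.len (PySem.List.pyGetD words i "") = PySem.Str.len pattern then
          if generateHash (PySem.List.pyGetD words i "") = generateHash pattern then
            ans ++ [PySem.List.pyGetD words i ""]
          else ans
        else ans)
      (fun (ans : List String) i =>
        if (PySem.Str.len (PySem.List.pyGetD words i "") = PySem.Str.len pattern ∧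
            generateHash (PySem.List.pyGetD words i "") = generateHash pattern)
        then ans ++ [PySem.List.pyGetD words i ""] else ans)
      [] (by intro acc x _; dsimp only; split_ifs <;> simp_all)]
    rw [PySem.List.foldl_append_ite]
    simp
  have hB : matchSpecificPattern_alt words n pattern
      = ((PySem.List.pyRange 0 n 1).filter (fun i =>
          decide (PySem.Str.len (PySem.List.pyGetD words i "") = PySem.Str.len pattern ∧
            isoScan (pattern.toList.zip (PySem.List.pyGetD words i "").toList)
              PySem.Dict.empty PySem.Dict.empty = true))).map
          (fun i => PySem.List.pyGetD words i "") := by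
    unfold matchSpecificPattern_alt
    simp only []
    rw [PySem.List.foldl_congr_mem (PySem.List.pyRange 0 n 1)
      (fun (ans : List String) i =>
        if PySem.Str.len (PySem.List.pyGetD words i "") ≠ PySem.Str.len pattern then ans
        else if isoScan (pattern.toList.zip (PySem.List.pyGetD words i "").toList)
              PySem.Dict.empty PySem.Dict.empty then ans ++ [PySem.List.pyGetD words i ""]
        else ans)
      (fun (ans : List String) i =>
        if (PySem.Str.len (PySem.List.pyGetD words i "") = PySem.Str.len pattern ∧
            isoScan (pattern.toList.zip (PySem.List.pyGetD words i "").toList)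
              PySem.Dict.empty PySem.Dict.empty = true)
        then ans ++ [PySem.List.pyGetD words i ""] else ans)
      [] (by intro acc x _; dsimp only; split_ifs <;> simp_all)]
    rw [PySem.List.foldl_append_ite]
    simp
  obtain ⟨w, hwtake, hlenw, hlabne, hhash⟩ := hD
  obtain ⟨k, hk, hkEq⟩ := List.getElem_of_mem hwtake
  have hkb : k < n.toNat ∧ k < words.length := by
    simp [List.length_take] at hk
    omega
  have hwk : words[k]'hkb.2 = w := by
    rw [← hkEq]
    exact List.getElem_take.symm
  have hi0mem : (k : Int) ∈ PySem.List.pyRange 0 n 1 :=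
    PySem.List.mem_pyRange_one.mpr ⟨by omega, by omega⟩
  have hwd : PySem.List.pyGetD words (k : Int) "" = w := by
    rw [PySem.List.pyGetD_eq_getElem words "" (by omega) (by omega)]
    simpa using hwk
  -- the counting argument
  intro hEq
  have hlenEq := congrArg List.length hEq
  rw [hA, hB] at hlenEq
  simp only [List.length_map] at hlenEq
  have hmono : ∀ x ∈ PySem.List.pyRange 0 n 1,
      (fun i => decide (PySem.Str.len (PySem.List.pyGetD words i "") = PySem.Str.len pattern ∧
        isoScan (pattern.toList.zip (PySem.List.pyGetD words i "").toList)
          PySem.Dict.empty PySem.Dict.empty = true)) x = true →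
      (fun i => decide (PySem.Str.len (PySem.List.pyGetD words i "") = PySem.Str.len pattern ∧
        generateHash (PySem.List.pyGetD words i "") = generateHash pattern)) x = true := by
    intro x _ hx
    simp only [decide_eq_true_eq] at hx ⊢
    refine ⟨hx.1, ?_⟩
    have hll := (strLen_iff _ _).mp hx.1
    rw [genHash_eq, genHash_eq]
    unfold canonHash
    rw [(altAccept pattern _ hll.symm).mp hx.2]
  have hP0 : (fun i => decide (PySem.Str.len (PySem.List.pyGetD words i "") = PySem.Str.len pattern ∧
        generateHash (PySem.List.pyGetD words i "") = generateHash pattern)) (k : Int) = true := by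
    simp only [decide_eq_true_eq, hwd]
    refine ⟨(strLen_iff _ _).mpr hlenw, ?_⟩
    rw [genHash_eq, genHash_eq]
    exact hhash
  have hQ0 : (fun i => decide (PySem.Str.len (PySem.List.pyGetD words i "") = PySem.Str.len pattern ∧
        isoScan (pattern.toList.zip (PySem.List.pyGetD words i "").toList)
          PySem.Dict.empty PySem.Dict.empty = true)) (k : Int) = false := by
    simp only [hwd, decide_eq_false_iff_not]
    intro hx
    exact hlabne (((altAccept pattern w hlenw.symm).mp hx.2).symm)
  have hlt := countP_lt_aux _ _ (PySem.List.pyRange 0 n 1) hmono (k : Int) hi0mem hP0 hQ0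
  rw [List.countP_eq_length_filter, List.countP_eq_length_filter] at hlt
  omega
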